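-- pv_equiv track=rewrite | github.com/jsnery/Exercicios-Curso-Python | Fase-2/encontrooprimeironumeroduplicado.py | duplicados
-- ===== SOURCE A (Python) =====
-- def duplicados(x):
--     numeroschecados = set()
--     resultado = -1
--
--     for n in x:
--         if n in numeroschecados:
--             resultado = n
--             break
--
--         numeroschecados.add(n)
--
--     return resultado
-- ===== SOURCE B (Python) =====
-- def duplicados(x):
--     xs = list(x)
--     pos = {}
--     for i, n in enumerate(xs):
--         pos[n] = pos.get(n, []) + [i]
--     dups = [(idxs[1], n) for n, idxs in pos.items() if len(idxs) >= 2]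
--     return min(dups)[1] if dups else -1
-- ===== Notes on version B (the rewrite author's own statement) =====
-- stated objective: alternative
-- what changed: Replaces A's early-exit scan with a seen-set by a staged global computation: one grouping pass builds a dict value->list of occurrence indices, then the answer is the value whose second-occurrence index is minimal (min over (idxs[1], value) pairs), -1 if no value occurs twice.
import Mathlib
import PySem

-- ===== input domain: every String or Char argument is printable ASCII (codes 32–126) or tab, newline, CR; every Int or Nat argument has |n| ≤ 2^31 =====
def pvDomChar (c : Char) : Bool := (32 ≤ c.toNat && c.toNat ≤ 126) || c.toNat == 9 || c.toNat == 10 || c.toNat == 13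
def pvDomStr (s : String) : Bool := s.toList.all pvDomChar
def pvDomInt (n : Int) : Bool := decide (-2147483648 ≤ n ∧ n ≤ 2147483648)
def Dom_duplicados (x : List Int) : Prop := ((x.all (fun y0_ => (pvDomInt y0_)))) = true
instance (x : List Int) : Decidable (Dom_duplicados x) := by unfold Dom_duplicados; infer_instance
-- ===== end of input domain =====

-- B replaces A's early-exit seen-set scan by a staged global computation: group indices by value into a dict, then pick the value with the minimal second-occurrence index (alternative algorithm, same results).


-- ===== PORT A =====
-- for n in x: if n in numeroschecados: resultado = n; break; numeroschecados.add(n)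
def dupGoA : List Int → PySem.Set Int → Int
  | [], _ => -1
  | n :: rest, seen => if seen.contains n then n else dupGoA rest (seen.add n)

def duplicados (x : List Int) : Int := dupGoA x PySem.Set.empty

-- ===== PORT B =====
-- pos = {}; for i, n in enumerate(xs): pos[n] = pos.get(n, []) + [i]
-- dups = [(idxs[1], n) for n, idxs in pos.items() if len(idxs) >= 2]
-- return min(dups)[1] if dups else -1     (min2? is Python's tuple-lexicographic min; none ↔ dups empty)
def duplicados_alt (x : List Int) : Int :=
  let pos := (PySem.List.enumerate x).foldl
      (fun d p => d.modify p.2 [] (fun l => l ++ [p.1])) PySem.Dict.empty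
  let dups := pos.items.filterMap
      (fun q => if 2 ≤ q.2.length then (PySem.List.pyGet? q.2 1).map (fun b => (b, q.1)) else none)
  match PySem.List.min2? dups Prod.fst Prod.snd with
  | some m => m.2
  | none => -1

-- ===== PRECONDITION & SPEC =====
def Spec_duplicados (x : List Int) (out : Int) : Prop := out = duplicados_alt x
instance (x : List Int) (out : Int) : Decidable (Spec_duplicados x out) := by unfold Spec_duplicados; infer_instance

-- ===== CLAIM (what is proved, stated in full; the proofs are below) =====
def Claim_equal_duplicados : Prop := ∀ (x : List Int), Dom_duplicados x → Spec_duplicados x (duplicados x)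

-- ===== LEMMAS AND PROOFS =====

-- A's loop, re-expressed as an index loop: first i with x[i] in x.take i (proof-side helper)
def dupLoopB (xs : List Int) (i : Nat) : Int :=
  if h : i < xs.length then
    if xs[i] ∈ xs.take i then xs[i] else dupLoopB xs (i + 1)
  else -1
termination_by xs.length - i

lemma dupGoA_eq_loopB : ∀ (rest pre : List Int),
    dupGoA rest (PySem.Set.ofList pre) = dupLoopB (pre ++ rest) pre.length := by
  intro rest
  induction rest with
  | nil =>
      intro pre
      simp [dupGoA, dupLoopB]
  | cons n rest ih =>
      intro pre
      rw [dupGoA]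
      rw [dupLoopB]
      have hlt : pre.length < (pre ++ n :: rest).length := by simp
      rw [dif_pos hlt]
      have hget : (pre ++ n :: rest)[pre.length]'hlt = n := by simp
      have htake : (pre ++ n :: rest).take pre.length = pre := by simp
      rw [hget, htake]
      have hmem : PySem.Set.contains (PySem.Set.ofList pre) n = decide (n ∈ pre) := by
        simp [PySem.Set.mem_ofList]
      by_cases h : n ∈ pre
      · rw [hmem, if_pos (by simp [h]), if_pos h]
      · have hadd : (PySem.Set.ofList pre).add n = PySem.Set.ofList (pre ++ [n]) := by
          simp [PySem.Set.ofList_eq_foldl]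
        rw [hmem, if_neg (by simp [h]), if_neg h, hadd, ih (pre ++ [n])]
        simp

-- occurrence-index list of v in x (what B's dict stores at key v)
def occ (x : List Int) (v : Int) : List Int :=
  ((PySem.List.enumerate x).filter (fun p => p.2 == v)).map (fun p => p.1)

lemma items_pos (x : List Int) :
    ((PySem.List.enumerate x).foldl
      (fun d p => d.modify p.2 [] (fun l => l ++ [p.1])) PySem.Dict.empty).items
    = (PySem.Set.ofList x).map (fun v => (v, occ x v)) := by
  have hkeys : ((PySem.List.enumerate x).foldl
      (fun d p => d.modify p.2 [] (fun l => l ++ [p.1])) PySem.Dict.empty).keys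
      = PySem.Set.ofList x := by
    have := PySem.Dict.keys_foldl_modify_key (PySem.List.enumerate x) (fun p => p.2)
      ([] : List Int) (fun _ p l => l ++ [p.1]) PySem.Dict.empty
    simpa [PySem.Set.update_nil_left, PySem.List.map_snd_enumerate] using this
  have hnd : ((PySem.List.enumerate x).foldl
      (fun d p => d.modify p.2 [] (fun l => l ++ [p.1])) PySem.Dict.empty).keys.Nodup := by
    exact PySem.Dict.nodup_keys_foldl_modify_key (PySem.List.enumerate x) (fun p => p.2)
      ([] : List Int) (fun _ p l => l ++ [p.1]) PySem.Dict.empty (by simp)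
  have hgd : ∀ v, ((PySem.List.enumerate x).foldl
      (fun d p => d.modify p.2 [] (fun l => l ++ [p.1])) PySem.Dict.empty).getD v ([] : List Int)
      = occ x v := by
    intro v
    have hswap : (PySem.List.enumerate x).foldl
        (fun d p => d.modify p.2 [] (fun l => l ++ [p.1])) PySem.Dict.empty
        = ((PySem.List.enumerate x).map Prod.swap).foldl
        (fun d q => d.modify q.1 [] (fun l => l ++ [q.2])) PySem.Dict.empty := by
      rw [List.foldl_map]
      rfl
    rw [hswap, PySem.Dict.getD_foldl_modify_append]
    simp [occ, List.filter_map, List.map_map, Function.comp_def]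
  rw [PySem.Dict.items_eq_map_keys _ hnd ([] : List Int), hkeys]
  exact List.map_congr_left (fun v _ => by rw [hgd])

lemma mem_occ (x : List Int) (v b : Int) (hb : b ∈ occ x v) :
    ∃ (j : Nat) (hj : j < x.length), b = (j : Int) ∧ x[j] = v := by
  simp only [occ, List.mem_map, List.mem_filter] at hb
  obtain ⟨p, ⟨hpmem, hpv⟩, hpb⟩ := hb
  rw [PySem.List.mem_enumerate_iff] at hpmem
  obtain ⟨k, hk, rfl⟩ := hpmem
  exact ⟨k, hk, by simpa using hpb.symm, by simpa using hpv⟩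

lemma occ_complete (x : List Int) (j : Nat) (hj : j < x.length) :
    (j : Int) ∈ occ x (x[j]) := by
  simp only [occ, List.mem_map, List.mem_filter]
  refine ⟨((j : Int), x[j]), ⟨?_, by simp⟩, by simp⟩
  rw [PySem.List.mem_enumerate_iff]
  exact ⟨j, hj, by simp⟩

lemma occ_sorted (x : List Int) (v : Int) : (occ x v).Pairwise (· < ·) := by
  have := PySem.List.pairwise_lt_enumerate x 0
  exact List.pairwise_map.mpr ((this.filter _))

-- the element at index 1 of occ is a second occurrence: its position j has x[j] = v and v ∈ x.take j
lemma occ_second (x : List Int) (v b : Int) (h : PySem.List.pyGet? (occ x v) 1 = some b) :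
    ∃ (j : Nat) (hj : j < x.length), b = (j : Int) ∧ x[j] = v ∧ v ∈ x.take j := by
  rcases heq : occ x v with _ | ⟨a, _ | ⟨c, t⟩⟩
  · rw [heq] at h; simp [PySem.List.pyGet?, PySem.List.pyIdx?] at h
  · rw [heq] at h; simp [PySem.List.pyGet?, PySem.List.pyIdx?] at h
  · rw [heq] at h
    simp [PySem.List.pyGet?, PySem.List.pyIdx?] at h
    obtain rfl : b = c := h.symm
    have hsorted := occ_sorted x v
    rw [heq] at hsorted
    have hac : a < b := (List.pairwise_cons.mp hsorted).1 b (by simp)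
    have ha : a ∈ occ x v := by rw [heq]; simp
    have hb : b ∈ occ x v := by rw [heq]; simp
    obtain ⟨j', hj', rfl, hxj'⟩ := mem_occ x v a ha
    obtain ⟨j, hj, rfl, hxj⟩ := mem_occ x v b hb
    have hjj : j' < j := by exact_mod_cast hac
    refine ⟨j, hj, rfl, hxj, ?_⟩
    have : (x.take j)[j']'(by simp; omega) = x[j'] := List.getElem_take
    rw [← hxj', ← this]
    exact List.getElem_mem _

-- B's min(dups): Python's tuple-lexicographic min step, written with min2?'s own matcher
def pvStep (acc : Option (Int × Int)) (x : Int × Int) : Option (Int × Int) :=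
  PySem.List.min2?.match_1 (fun _ => Option (Int × Int)) acc (fun _ => some x)
    (fun a => if (decide (x.1 < a.1) || !decide (a.1 < x.1) && decide (x.2 < a.2)) = true then some x else some a)

-- lexicographic min of a list with a strictly minimal member
lemma min2?_eq_of_strict (l : List (Int × Int)) (m : Int × Int) (hm : m ∈ l)
    (h : ∀ y ∈ l, y = m ∨ m.1 < y.1) :
    PySem.List.min2? l Prod.fst Prod.snd = some m := by
  unfold PySem.List.min2?
  show List.foldl pvStep none l = some m
  suffices H : ∀ (l : List (Int × Int)) (acc : Option (Int × Int)),
      (∀ y ∈ l, y = m ∨ m.1 < y.1) →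
      ((m ∈ l ∧ (acc = none ∨ ∃ a, acc = some a ∧ m.1 < a.1)) ∨ acc = some m) →
      List.foldl pvStep acc l = some m by
    exact H l none h (Or.inl ⟨hm, Or.inl rfl⟩)
  clear hm h l
  intro l
  induction l with
  | nil =>
      intro acc _ hacc
      rcases hacc with ⟨hmem, _⟩ | rfl
      · exact absurd hmem (List.not_mem_nil)
      · rfl
  | cons y t ih =>
      intro acc hall hacc
      have hy := hall y (by simp)
      have hallt : ∀ z ∈ t, z = m ∨ m.1 < z.1 := fun z hz => hall z (by simp [hz])
      simp only [List.foldl_cons]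
      rcases hacc with ⟨hmem, hrest⟩ | rfl
      · have hmt : y = m ∨ m ∈ t := by
          rcases List.mem_cons.mp hmem with h | h
          · exact Or.inl h.symm
          · exact Or.inr h
        rcases hrest with rfl | ⟨a, rfl, hma⟩
        · -- acc = none: becomes some y
          rw [show pvStep none y = some y from rfl]
          rcases hy with hym | hlt
          · rw [hym]; exact ih _ hallt (Or.inr rfl)
          · have hmt' : m ∈ t := by
              rcases hmt with h | h
              · rw [h] at hlt; exact absurd hlt (lt_irrefl _)
              · exact h
            exact ih _ hallt (Or.inl ⟨hmt', Or.inr ⟨y, rfl, hlt⟩⟩)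
        · -- acc = some a with m.1 < a.1
          rw [show pvStep (some a) y =
              (if (decide (y.1 < a.1) || !decide (a.1 < y.1) && decide (y.2 < a.2)) = true
               then some y else some a) from rfl]
          rcases hy with hym | hlt
          · -- y = m : comparison picks y (= m) since m.1 < a.1
            have hc : (decide (y.1 < a.1) || !decide (a.1 < y.1) && decide (y.2 < a.2)) = true := by
              rw [hym]; simp [hma]
            rw [if_pos hc, hym]
            exact ih _ hallt (Or.inr rfl)
          · have hmt' : m ∈ t := by
              rcases hmt with h | h
              · rw [h] at hlt; exact absurd hlt (lt_irrefl _)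
              · exact h
            by_cases hc : (decide (y.1 < a.1) || !decide (a.1 < y.1) && decide (y.2 < a.2)) = true
            · rw [if_pos hc]
              exact ih _ hallt (Or.inl ⟨hmt', Or.inr ⟨y, rfl, hlt⟩⟩)
            · rw [if_neg hc]
              exact ih _ hallt (Or.inl ⟨hmt', Or.inr ⟨a, rfl, hma⟩⟩)
      · -- acc = some m: any further y keeps some m
        rw [show pvStep (some m) y =
            (if (decide (y.1 < m.1) || !decide (m.1 < y.1) && decide (y.2 < m.2)) = true
             then some y else some m) from rfl]
        rcases hy with hym | hlt
        · have hc : (decide (y.1 < m.1) || !decide (m.1 < y.1) && decide (y.2 < m.2)) = false := by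
            rw [hym]; simp
          rw [hc]
          simp only [Bool.false_eq_true, if_false]
          exact ih _ hallt (Or.inr rfl)
        · have hc : (decide (y.1 < m.1) || !decide (m.1 < y.1) && decide (y.2 < m.2)) = false := by
            simp only [Bool.or_eq_false_iff, Bool.and_eq_false_iff, decide_eq_false_iff_not,
              Bool.not_eq_false', decide_eq_true_eq]
            exact ⟨not_lt_of_gt hlt, Or.inl hlt⟩
          rw [hc]
          simp only [Bool.false_eq_true, if_false]
          exact ih _ hallt (Or.inr rfl)

lemma dupLoopB_none (x : List Int) (h : ∀ (j : Nat) (hj : j < x.length), x[j] ∉ x.take j) :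
    ∀ i, dupLoopB x i = -1 := by
  suffices H : ∀ (n i : Nat), x.length - i ≤ n → dupLoopB x i = -1 by
    intro i; exact H (x.length - i) i le_rfl
  intro n
  induction n with
  | zero =>
      intro i hi
      rw [dupLoopB, dif_neg (by omega)]
  | succ n ih =>
      intro i hi
      rw [dupLoopB]
      by_cases hlt : i < x.length
      · rw [dif_pos hlt, if_neg (h i hlt)]
        exact ih (i + 1) (by omega)
      · rw [dif_neg hlt]

lemma dupLoopB_hit (x : List Int) (i0 : Nat) (h0 : i0 < x.length) (hp : x[i0] ∈ x.take i0)
    (hmin : ∀ j (hj : j < x.length), j < i0 → x[j] ∉ x.take j) :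
    ∀ i, i ≤ i0 → dupLoopB x i = x[i0] := by
  suffices H : ∀ (n i : Nat), i0 - i ≤ n → i ≤ i0 → dupLoopB x i = x[i0] by
    intro i hi; exact H (i0 - i) i le_rfl hi
  intro n
  induction n with
  | zero =>
      intro i hn hi
      have : i = i0 := by omega
      subst this
      rw [dupLoopB, dif_pos h0, if_pos hp]
  | succ n ih =>
      intro i hn hi
      by_cases hii : i = i0
      · subst hii
        rw [dupLoopB, dif_pos h0, if_pos hp]
      · have hilt : i < i0 := by omega
        have hlen : i < x.length := by omega
        rw [dupLoopB, dif_pos hlen, if_neg (hmin i hlen hilt)]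
        exact ih (i + 1) (by omega) (by omega)

-- ===== VERDICT (by name: the statement is the Claim_ definition above) =====
theorem duplicados_spec : Claim_equal_duplicados := by
  intro x _
  unfold Spec_duplicados
  have hA : duplicados x = dupLoopB x 0 := by
    unfold duplicados
    simpa using dupGoA_eq_loopB x []
  have hB : duplicados_alt x =
      match PySem.List.min2? ((PySem.Set.ofList x).filterMap
        (fun v => if 2 ≤ (occ x v).length
                  then (PySem.List.pyGet? (occ x v) 1).map (fun b => (b, v)) else none))
        Prod.fst Prod.snd with
      | some m => m.2
      | none => -1 := by
    unfold duplicados_alt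
    simp only [items_pos, List.filterMap_map]
    rfl
  rw [hA, hB]
  by_cases hex : ∃ j, ∃ _ : j < x.length, x[j] ∈ x.take j
  · -- a duplicate exists; i0 = first index whose element already occurred
    obtain ⟨i0, hi0S, hmin⟩ := Nat.lt_wfRel.wf.has_min
      {j | ∃ _ : j < x.length, x[j] ∈ x.take j} hex
    obtain ⟨h0, hp⟩ := hi0S
    have hminP : ∀ j (hj : j < x.length), j < i0 → x[j] ∉ x.take j :=
      fun j hj hlt hmem => hmin j ⟨hj, hmem⟩ hlt
    rw [dupLoopB_hit x i0 h0 hp hminP 0 (Nat.zero_le _)]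
    -- the first occurrence of x[i0], strictly before i0
    obtain ⟨j1, hj1len', hj1get⟩ := List.getElem_of_mem hp
    have hj1i0 : j1 < i0 := by
      have := hj1len'
      simp at this
      omega
    have hj1len : j1 < x.length := by
      have := hj1len'
      simp at this
      omega
    have hxj1 : x[j1] = x[i0] := by
      rw [← hj1get]
      exact (List.getElem_take).symm
    have hmemi0 : ((i0 : Int)) ∈ occ x (x[i0]) := occ_complete x i0 h0
    have hmemj1 : ((j1 : Int)) ∈ occ x (x[i0]) := by
      have := occ_complete x j1 hj1len
      rwa [hxj1] at this
    rcases heq : occ x (x[i0]) with _ | ⟨a, _ | ⟨b, t⟩⟩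
    · rw [heq] at hmemi0
      exact absurd hmemi0 (List.not_mem_nil)
    · rw [heq] at hmemi0 hmemj1
      have h1 : ((i0 : Int)) = a := by simpa using hmemi0
      have h2 : ((j1 : Int)) = a := by simpa using hmemj1
      exfalso
      have : (j1 : Int) < (i0 : Int) := by exact_mod_cast hj1i0
      omega
    · have hsort := occ_sorted x (x[i0])
      rw [heq] at hsort
      have hbi0 : b = (i0 : Int) := by
        have hji : (j1 : Int) < (i0 : Int) := by exact_mod_cast hj1i0
        rw [heq] at hmemi0 hmemj1
        have hble : b ≤ (i0 : Int) := by
          rcases List.mem_cons.mp hmemi0 with hia | hibt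
          · -- ↑i0 = a: impossible, since ↑j1 < ↑i0 is also in the sorted list
            exfalso
            rcases List.mem_cons.mp hmemj1 with hja | hjbt
            · omega
            · have := (List.pairwise_cons.mp hsort).1 _ hjbt
              omega
          · rcases List.mem_cons.mp hibt with hib | hit
            · omega
            · have := (List.pairwise_cons.mp ((List.pairwise_cons.mp hsort).2)).1 _ hit
              omega
        have hbge : (i0 : Int) ≤ b := by
          have hget : PySem.List.pyGet? (occ x (x[i0])) 1 = some b := by
            rw [heq]; simp [PySem.List.pyGet?, PySem.List.pyIdx?]
          obtain ⟨j, hj, rfl, hxj, htake⟩ := occ_second x (x[i0]) b hget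
          have hnot : ¬ j < i0 := hmin j ⟨hj, by rw [hxj]; exact htake⟩
          exact_mod_cast Nat.le_of_not_lt hnot
        omega
      have hsec : PySem.List.pyGet? (occ x (x[i0])) 1 = some ((i0 : Int)) := by
        rw [heq, ← hbi0]; simp [PySem.List.pyGet?, PySem.List.pyIdx?]
      have hlen2 : 2 ≤ (occ x (x[i0])).length := by rw [heq]; simp
      have hmdups : (((i0 : Int)), x[i0]) ∈ (PySem.Set.ofList x).filterMap
          (fun v => if 2 ≤ (occ x v).length
                    then (PySem.List.pyGet? (occ x v) 1).map (fun b => (b, v)) else none) := by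
        refine List.mem_filterMap.mpr ⟨x[i0], (PySem.Set.mem_ofList x _).mpr (List.getElem_mem h0), ?_⟩
        rw [if_pos hlen2, hsec]
        rfl
      have hstrict : ∀ y ∈ (PySem.Set.ofList x).filterMap
          (fun v => if 2 ≤ (occ x v).length
                    then (PySem.List.pyGet? (occ x v) 1).map (fun b => (b, v)) else none),
          y = (((i0 : Int)), x[i0]) ∨ ((i0 : Int)) < y.1 := by
        intro y hy
        obtain ⟨v, _, hfv⟩ := List.mem_filterMap.mp hy
        by_cases h2 : 2 ≤ (occ x v).length
        · rw [if_pos h2] at hfv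
          obtain ⟨bb, hbb, rfl⟩ := Option.map_eq_some_iff.mp hfv
          obtain ⟨j, hj, rfl, hxj, htake⟩ := occ_second x v bb hbb
          have hnot : ¬ j < i0 := hmin j ⟨hj, by rw [hxj]; exact htake⟩
          rcases Nat.lt_or_ge i0 j with hlt | hge
          · refine Or.inr ?_
            show (i0 : Int) < (j : Int)
            exact_mod_cast hlt
          · have : i0 = j := by omega
            subst this
            exact Or.inl (by rw [hxj])
        · rw [if_neg h2] at hfv
          exact absurd hfv (by simp)
      rw [min2?_eq_of_strict _ _ hmdups hstrict]
  · -- no duplicate: both sides are -1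
    have hnone : ∀ (j : Nat) (hj : j < x.length), x[j] ∉ x.take j :=
      fun j hj hmem => hex ⟨j, hj, hmem⟩
    rw [dupLoopB_none x hnone 0]
    have hemp : (PySem.Set.ofList x).filterMap
        (fun v => if 2 ≤ (occ x v).length
                  then (PySem.List.pyGet? (occ x v) 1).map (fun b => (b, v)) else none) = [] := by
      rw [List.filterMap_eq_nil_iff]
      intro v _
      by_cases h2 : 2 ≤ (occ x v).length
      · exfalso
        rcases heq : occ x v with _ | ⟨a, _ | ⟨b, t⟩⟩
        · rw [heq] at h2; exact absurd h2 (by simp)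
        · rw [heq] at h2; exact absurd h2 (by simp)
        · have hget : PySem.List.pyGet? (occ x v) 1 = some b := by
            rw [heq]; simp [PySem.List.pyGet?, PySem.List.pyIdx?]
          obtain ⟨j, hj, rfl, hxj, htake⟩ := occ_second x v b hget
          exact hnone j hj (by rw [hxj]; exact htake)
      · rw [if_neg h2]
    rw [hemp]
    rfl
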